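-- pv_equiv track=rewrite | github.com/hhc97/online_coding | Kattis/srednji.py | count_sublists
-- ===== SOURCE A (Python) =====
-- def _check_odd(start_index, end_index):
--     return ((end_index + 1) - start_index) % 2 == 1
--
-- def count_sublists(lst):
--     seen = {}
--     running_sum = 0
--     total = 0
--
--     for i in range(len(lst)):
--         running_sum += lst[i]
--
--         if running_sum == 0:
--             total += _check_odd(0, i)
--
--         all_previous = []
--         if running_sum in seen:
--             all_previous = seen[running_sum]
--             for index in all_previous:
--                 total += _check_odd(index + 1, i)
--
--         all_previous.append(i)
--         seen[running_sum] = all_previous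
--     return total
-- ===== SOURCE B (Python) =====
-- def count_sublists(lst):
--     # prefix sums: a sublist lst[j..i] sums to 0 and has odd length
--     # iff prefix sums P_j and P_{i+1} are equal and j, i+1 have opposite parity.
--     counts = {(0, 0): 1}
--     s = 0
--     m = 0
--     total = 0
--     for x in lst:
--         s += x
--         m += 1
--         total += counts.get((s, 1 - m % 2), 0)
--         key = (s, m % 2)
--         counts[key] = counts.get(key, 0) + 1
--     return total
-- ===== Notes on version B (the rewrite author's own statement) =====
-- stated objective: alternative
-- what changed: replaces the dict of per-sum index lists with an inner loop over all previous equal prefix sums by a one-pass counter dict keyed by (prefix sum, index parity), adding one count lookup per element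
import Mathlib
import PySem

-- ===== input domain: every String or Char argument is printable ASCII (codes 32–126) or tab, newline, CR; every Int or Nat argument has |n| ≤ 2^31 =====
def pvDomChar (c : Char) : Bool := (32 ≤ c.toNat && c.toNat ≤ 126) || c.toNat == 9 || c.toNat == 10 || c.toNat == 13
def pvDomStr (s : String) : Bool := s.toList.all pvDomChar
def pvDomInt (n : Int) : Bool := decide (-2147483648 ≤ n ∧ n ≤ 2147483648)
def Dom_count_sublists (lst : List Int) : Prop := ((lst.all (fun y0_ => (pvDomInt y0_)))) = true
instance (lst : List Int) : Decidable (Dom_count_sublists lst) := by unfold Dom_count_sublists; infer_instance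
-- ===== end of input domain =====

-- B replaces A's dict of index lists (inner loop over previous equal prefix sums) by a one-pass
-- counter keyed by (prefix sum, index parity); equivalence of the return value is proved.

-- ===== PORT A =====
-- _check_odd(start, end) — indices here are Nats (Python's loop indices are ≥ 0), % is Nat mod,
-- exact since end+1 ≥ start on every call site.
def check_odd (start_index end_index : Nat) : Bool :=
  ((end_index + 1) - start_index) % 2 == 1

-- one iteration of A's 'for i in range(len(lst))' body; the index i is carried in the state
-- (equivalent to iterating i over range(len(lst)) and reading lst[i])
def stepA (st : PySem.Dict Int (List Nat) × Int × Int × Nat) (x : Int) :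
    PySem.Dict Int (List Nat) × Int × Int × Nat :=
  let (seen, running_sum, total, i) := st
  let running_sum := running_sum + x
  let total := if running_sum = 0 then total + (if check_odd 0 i then 1 else 0) else total
  let all_previous := (seen.get? running_sum).getD []
  let total := all_previous.foldl (fun t index => t + (if check_odd (index + 1) i then 1 else 0)) total
  let seen := seen.insert running_sum (all_previous ++ [i])
  (seen, running_sum, total, i + 1)

def count_sublists (lst : List Int) : Int :=
  (lst.foldl stepA (PySem.Dict.empty, 0, 0, 0)).2.2.1

-- ===== PORT B =====
-- one iteration of B's loop; key parity is a Nat (m % 2 on a Python non-negative int is exact)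
def stepB (st : PySem.Dict (Int × Nat) Int × Int × Int × Nat) (x : Int) :
    PySem.Dict (Int × Nat) Int × Int × Int × Nat :=
  let (counts, s, total, m) := st
  let s := s + x
  let m := m + 1
  let total := total + counts.getD (s, 1 - m % 2) 0
  let counts := counts.insert (s, m % 2) (counts.getD (s, m % 2) 0 + 1)
  (counts, s, total, m)

def count_sublists_alt (lst : List Int) : Int :=
  (lst.foldl stepB (PySem.Dict.empty.insert ((0 : Int), (0 : Nat)) 1, 0, 0, 0)).2.2.1

-- ===== PRECONDITION & SPEC =====
def Spec_count_sublists (lst : List Int) (out : Int) : Prop := out = count_sublists_alt lst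
instance (lst : List Int) (out : Int) : Decidable (Spec_count_sublists lst out) := by unfold Spec_count_sublists; infer_instance

-- ===== CLAIM (what is proved, stated in full; the proofs are below) =====
def Claim_equal_count_sublists : Prop := ∀ (lst : List Int), Dom_count_sublists lst → Spec_count_sublists lst (count_sublists lst)

-- ===== LEMMAS AND PROOFS =====

-- the list A keeps in seen for sum s (empty when absent)
def seenL (seen : PySem.Dict Int (List Nat)) (s : Int) : List Nat :=
  (seen.get? s).getD []

-- invariant linking A's seen to B's counts after processing m elements
def InvAB (seen : PySem.Dict Int (List Nat)) (counts : PySem.Dict (Int × Nat) Int) (m : Nat) : Prop :=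
  (∀ s p, counts.getD (s, p) 0 =
      (if s = 0 ∧ p = 0 then 1 else 0) +
      (((seenL seen s).countP (fun j => (j + 1) % 2 == p) : Nat) : Int)) ∧
  (∀ s j, j ∈ seenL seen s → j < m)

lemma foldl_count (l : List Nat) (c : Nat → Bool) (t : Int) :
    l.foldl (fun t index => t + (if c index then 1 else 0)) t
      = t + ((l.countP c : Nat) : Int) := by
  induction l generalizing t with
  | nil => simp
  | cons a l ih =>
    rw [List.foldl_cons, ih, List.countP_cons]
    by_cases h : c a <;> simp [h] <;> push_cast <;> ring

lemma inv_step (seen : PySem.Dict Int (List Nat)) (counts : PySem.Dict (Int × Nat) Int)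
    (m : Nat) (rs : Int) (t : Int) (x : Int)
    (hInv : InvAB seen counts m) :
    (stepA (seen, rs, t, m) x).2.2.1 = (stepB (counts, rs, t, m) x).2.2.1 ∧
    InvAB (stepA (seen, rs, t, m) x).1 (stepB (counts, rs, t, m) x).1 (m + 1) := by
  obtain ⟨hc, hb⟩ := hInv
  have key : ∀ s' : Int, ∀ p : Nat, p = 1 - (m + 1) % 2 →
      (if s' = 0 then t + (if check_odd 0 m then 1 else 0) else t)
        + ((((seenL seen s').countP (fun j => check_odd (j + 1) m)) : Nat) : Int)
      = t + counts.getD (s', p) 0 := by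
    intro s' p hp
    have hcnt : (seenL seen s').countP (fun j => check_odd (j + 1) m)
        = (seenL seen s').countP (fun j => (j + 1) % 2 == p) := by
      apply List.countP_congr
      intro j hj
      have hjm := hb s' j hj
      simp only [check_odd, beq_iff_eq, decide_eq_decide]
      omega
    rw [hcnt, hc s' p]
    by_cases h0 : s' = 0
    · subst h0
      have : check_odd 0 m = decide (p = 0) := by
        simp only [check_odd]; rw [hp]
        rcases Nat.mod_two_eq_zero_or_one (m + 1) with h | h <;> simp [h] <;> try omega
      rw [this]
      by_cases hpz : p = 0 <;> simp [hpz] <;> ring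
    · simp [h0]; try ring
  constructor
  · -- totals equal after the step
    show (let rs' := rs + x; _) = _
    simp only [stepA, stepB, foldl_count]
    exact key (rs + x) (1 - (m + 1) % 2) rfl
  · constructor
    · intro s p
      simp only [stepA, stepB]
      rw [PySem.Dict.getD_insert]
      have hLs : seenL (seen.insert (rs + x) ((seen.get? (rs + x)).getD [] ++ [m])) s
          = if s = rs + x then seenL seen s ++ [m] else seenL seen s := by
        by_cases hs : s = rs + x
        · simp [seenL, hs, PySem.Dict.get?_insert_self]
        · simp [hs, seenL, PySem.Dict.get?_insert_of_ne _ _ hs]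
      rw [hLs]
      by_cases hk : (s, p) = (rs + x, (m + 1) % 2)
      · have hs : s = rs + x := (Prod.mk.injEq .. ▸ hk).1
        have hp : p = (m + 1) % 2 := (Prod.mk.injEq .. ▸ hk).2
        rw [if_pos hk, if_pos hs, ← hs, ← hp, hc s p, List.countP_append]
        simp [List.countP_cons, hp]
        push_cast; ring
      · rw [if_neg hk, hc s p]
        by_cases hs : s = rs + x
        · -- same sum, different parity: appended index m has parity (m+1)%2 ≠ p
          have hp : p ≠ (m + 1) % 2 := fun h => hk (by rw [hs, h])
          rw [if_pos hs, List.countP_append]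
          simp [List.countP_cons, Ne.symm hp]
        · rw [if_neg hs]
    · intro s j hj
      simp only [stepA] at hj
      by_cases hs : s = rs + x
      · have hL : seenL (seen.insert (rs + x) ((seen.get? (rs + x)).getD [] ++ [m])) s
            = seenL seen s ++ [m] := by
          simp [seenL, hs, PySem.Dict.get?_insert_self]
        rw [hL] at hj
        rcases List.mem_append.mp hj with h | h
        · exact Nat.lt_succ_of_lt (hb s j h)
        · simp at h; omega
      · have hL : seenL (seen.insert (rs + x) ((seen.get? (rs + x)).getD [] ++ [m])) s
            = seenL seen s := by
          simp [seenL, PySem.Dict.get?_insert_of_ne _ _ hs]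
        rw [hL] at hj
        exact Nat.lt_succ_of_lt (hb s j hj)

lemma foldl_equiv (l : List Int) (seen : PySem.Dict Int (List Nat))
    (counts : PySem.Dict (Int × Nat) Int) (rs t : Int) (m : Nat)
    (hInv : InvAB seen counts m) :
    (l.foldl stepA (seen, rs, t, m)).2.2.1 = (l.foldl stepB (counts, rs, t, m)).2.2.1 := by
  induction l generalizing seen counts rs t m with
  | nil => rfl
  | cons x l ih =>
    obtain ⟨ht, hInv'⟩ := inv_step seen counts m rs t x hInv
    rw [List.foldl_cons, List.foldl_cons]
    have hA : stepA (seen, rs, t, m) x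
        = ((stepA (seen, rs, t, m) x).1, (stepA (seen, rs, t, m) x).2.1,
           (stepA (seen, rs, t, m) x).2.2.1, m + 1) := by
      simp [stepA]
    have hB : stepB (counts, rs, t, m) x
        = ((stepB (counts, rs, t, m) x).1, (stepB (counts, rs, t, m) x).2.1,
           (stepB (counts, rs, t, m) x).2.2.1, m + 1) := by
      simp [stepB]
    have hrs : (stepA (seen, rs, t, m) x).2.1 = (stepB (counts, rs, t, m) x).2.1 := by
      simp [stepA, stepB]
    rw [hA, hB, ht, hrs]
    exact ih _ _ _ _ _ hInv'

lemma inv_init : InvAB PySem.Dict.empty (PySem.Dict.empty.insert ((0 : Int), (0 : Nat)) 1) 0 := by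
  constructor
  · intro s p
    rw [PySem.Dict.getD_insert]
    by_cases h : (s, p) = ((0 : Int), (0 : Nat))
    · obtain ⟨hs, hp⟩ := Prod.mk.injEq .. ▸ h
      simp [h, hs, hp, seenL, PySem.Dict.get?_empty]
    · have : ¬(s = 0 ∧ p = 0) := fun ⟨hs, hp⟩ => h (by rw [hs, hp])
      simp [h, this, seenL, PySem.Dict.get?_empty, PySem.Dict.getD_empty]
  · intro s j hj
    simp [seenL, PySem.Dict.get?_empty] at hj

-- ===== VERDICT (by name: the statement is the Claim_ definition above) =====
theorem count_sublists_spec : Claim_equal_count_sublists := by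
  intro lst _
  show count_sublists lst = count_sublists_alt lst
  exact foldl_equiv lst _ _ 0 0 0 inv_init
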